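-- pv_equiv track=rewrite | github.com/erik-petrov/crypt-hws | hw2/asn1_encoder.py | getEmptyBytes
-- ===== SOURCE A (Python) =====
-- def getEmptyBytes(bitstr):
--     emptyBytes = 0
--     temp = 0
--     for i in bitstr:
--         if i == '0':
--             temp += 1
--         else:
--             break
--         if temp == 8:
--             emptyBytes+=1
--             temp = 0
--
--     return emptyBytes
-- ===== SOURCE B (Python) =====
-- def getEmptyBytes(bitstr):
--     count = 0
--     while bitstr[count * 8 : count * 8 + 8] == '0' * 8:
--         count += 1
--     return count
-- ===== Notes on version B (the rewrite author's own statement) =====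
-- stated objective: alternative
-- what changed: Replaces A's per-character loop with counter bookkeeping (temp bumped into emptyBytes at 8) by a while loop that repeatedly compares the next 8-character slice against '0'*8 and counts matching whole-byte slices.
import Mathlib
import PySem

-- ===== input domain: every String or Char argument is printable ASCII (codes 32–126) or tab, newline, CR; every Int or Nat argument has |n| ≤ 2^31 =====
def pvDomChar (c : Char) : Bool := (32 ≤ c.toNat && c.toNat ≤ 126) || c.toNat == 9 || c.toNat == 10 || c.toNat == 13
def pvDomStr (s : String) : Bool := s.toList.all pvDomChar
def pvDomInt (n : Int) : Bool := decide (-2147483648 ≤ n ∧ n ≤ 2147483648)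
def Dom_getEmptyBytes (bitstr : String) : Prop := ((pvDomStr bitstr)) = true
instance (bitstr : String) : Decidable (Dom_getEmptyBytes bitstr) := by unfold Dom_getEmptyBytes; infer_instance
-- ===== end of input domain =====

-- B replaces A's per-character counter loop by a while loop that compares whole 8-character
-- slices against '0'*8; objective: alternative decomposition (whole-byte slice tests).

-- ===== PORT A =====
-- for i in bitstr with state (emptyBytes, temp); 'break' ends the recursion
def getEmptyBytesLoop : List Char → Int → Int → Int
  | [], emptyBytes, _ => emptyBytes
  | c :: rest, emptyBytes, temp =>
    if c = '0' then
      let temp' := temp + 1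
      if temp' = 8 then getEmptyBytesLoop rest (emptyBytes + 1) 0
      else getEmptyBytesLoop rest emptyBytes temp'
    else emptyBytes

def getEmptyBytes (bitstr : String) : Int :=
  getEmptyBytesLoop bitstr.toList 0 0

-- ===== PORT B =====
-- '0' * 8
def zeros8 : List Char := ['0', '0', '0', '0', '0', '0', '0', '0']

-- while bitstr[count*8 : count*8+8] == '0'*8: count += 1
def bWhile (cs : List Char) (count : Nat) : Int :=
  if h : PySem.List.slice cs (some ((count * 8 : Nat) : Int)) (some ((count * 8 + 8 : Nat) : Int)) = zeros8
  then bWhile cs (count + 1)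
  else (count : Int)
termination_by cs.length - count * 8
decreasing_by
  rw [PySem.List.slice_natCast] at h
  have hlen := congrArg List.length h
  simp [zeros8] at hlen
  omega

def getEmptyBytes_alt (bitstr : String) : Int :=
  bWhile bitstr.toList 0

-- ===== PRECONDITION & SPEC =====
def Spec_getEmptyBytes (bitstr : String) (out : Int) : Prop := out = getEmptyBytes_alt bitstr
instance (bitstr : String) (out : Int) : Decidable (Spec_getEmptyBytes bitstr out) := by unfold Spec_getEmptyBytes; infer_instance

-- ===== CLAIM =====
def Claim_equal_getEmptyBytes : Prop := ∀ (bitstr : String), Dom_getEmptyBytes bitstr → Spec_getEmptyBytes bitstr (getEmptyBytes bitstr)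

-- ===== LEMMAS AND PROOFS =====

-- length of the leading run of '0' characters (proof helper only)
def leadRun : List Char → Nat
  | [] => 0
  | c :: rest => if c = '0' then leadRun rest + 1 else 0

theorem getEmptyBytesLoop_eq (cs : List Char) :
    ∀ (e : Int) (t : Nat), t < 8 →
      getEmptyBytesLoop cs e (t : Int) = e + ((t + leadRun cs) / 8 : Nat) := by
  induction cs with
  | nil =>
    intro e t ht
    simp only [getEmptyBytesLoop, leadRun]
    omega
  | cons c rest ih =>
    intro e t ht
    have hlr : leadRun (c :: rest) = if c = '0' then leadRun rest + 1 else 0 := rfl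
    by_cases hc : c = '0'
    · rw [hlr, if_pos hc]
      by_cases h8 : t = 7
      · subst h8
        have h1 : ((7 : Nat) : Int) + 1 = 8 := by norm_num
        have h0 := ih (e + 1) 0 (by omega)
        simp only [Nat.cast_zero, Nat.zero_add] at h0
        simp only [getEmptyBytesLoop]
        rw [if_pos hc, if_pos h1, h0]
        have h2 : (7 + (leadRun rest + 1)) / 8 = 1 + leadRun rest / 8 := by omega
        rw [h2]
        push_cast
        ring
      · have h1 : ((t : Nat) : Int) + 1 ≠ 8 := by
          intro h; apply h8; exact_mod_cast (by omega : (t : Int) = 7)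
        have hcast : ((t : Nat) : Int) + 1 = ((t + 1 : Nat) : Int) := by push_cast; ring
        have h0 := ih e (t + 1) (by omega)
        simp only [getEmptyBytesLoop]
        rw [if_pos hc, if_neg h1, hcast, h0]
        congr 2
        omega
    · rw [hlr, if_neg hc]
      simp only [getEmptyBytesLoop]
      rw [if_neg hc]
      omega

theorem leadRun_replicate_append (k : Nat) (rest : List Char) :
    leadRun (List.replicate k '0' ++ rest) = k + leadRun rest := by
  induction k with
  | zero => simp
  | succ n ih => simp [List.replicate_succ, leadRun, ih]; omega

theorem take_of_le_leadRun (cs : List Char) :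
    ∀ n, n ≤ leadRun cs → cs.take n = List.replicate n '0' := by
  induction cs with
  | nil =>
    intro n hn
    simp only [leadRun] at hn
    interval_cases n
    simp
  | cons c rest ih =>
    intro n hn
    cases n with
    | zero => simp
    | succ m =>
      simp only [leadRun] at hn
      by_cases hc : c = '0'
      · rw [if_pos hc] at hn
        simp [List.take_succ_cons, List.replicate_succ, hc, ih m (by omega)]
      · rw [if_neg hc] at hn; omega

theorem bWhile_eq (cs : List Char) (count : Nat) :
    bWhile cs count = (count : Int) + ((leadRun (cs.drop (count * 8)) / 8 : Nat) : Int) := by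
  induction count using bWhile.induct (cs := cs) with
  | case1 count h ih =>
    rw [bWhile, dif_pos h, ih]
    rw [PySem.List.slice_natCast] at h
    have htake : (cs.drop (count * 8)).take 8 = List.replicate 8 '0' := by
      rw [(by omega : count * 8 + 8 - count * 8 = 8)] at h
      rw [h]; decide
    have hsplit : cs.drop (count * 8) = List.replicate 8 '0' ++ (cs.drop (count * 8)).drop 8 := by
      conv_lhs => rw [← List.take_append_drop 8 (cs.drop (count * 8))]
      rw [htake]
    have hdd : (cs.drop (count * 8)).drop 8 = cs.drop ((count + 1) * 8) := by
      rw [List.drop_drop]; congr 1; omega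
    rw [hsplit, leadRun_replicate_append, hdd]
    have : (8 + leadRun (cs.drop ((count + 1) * 8))) / 8
        = 1 + leadRun (cs.drop ((count + 1) * 8)) / 8 := by omega
    rw [this]
    push_cast
    ring
  | case2 count h =>
    rw [bWhile, dif_neg h]
    have hlt : leadRun (cs.drop (count * 8)) < 8 := by
      by_contra hge
      apply h
      rw [PySem.List.slice_natCast, (by omega : count * 8 + 8 - count * 8 = 8)]
      rw [take_of_le_leadRun _ 8 (by omega)]
      decide
    rw [Nat.div_eq_of_lt hlt]
    simp

-- ===== VERDICT =====
theorem getEmptyBytes_spec : Claim_equal_getEmptyBytes := by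
  intro bitstr _
  unfold Spec_getEmptyBytes getEmptyBytes getEmptyBytes_alt
  have hA := getEmptyBytesLoop_eq bitstr.toList 0 0 (by omega)
  simp only [Nat.cast_zero, Nat.zero_add] at hA
  rw [hA, bWhile_eq]
  simp
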